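-- pv_equiv track=rewrite | github.com/adenmao1202/Solved_problems | HW/PythonEx6.py | build_and_search_dictionary
-- ===== SOURCE A (Python) =====
-- def build_and_search_dictionary(dictionary_words, search_queries):
--     organized_dict = {}
--     word_count = {}
--
--     # Sort the words before processing them to build the dictionary
--     words = sorted(dictionary_words.split(","))
--     for word in words:
--         first_letter = word[0].upper()
--         if first_letter not in organized_dict:
--             organized_dict[first_letter] = {}
--             word_count[first_letter] = 0
--
--         word_count[first_letter] += 1
--         organized_dict[first_letter][word] = word_count[first_letter]
--
--     results = []
--     for query in search_queries:
--         if query == "":  # Handling empty queries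
--             results.append("NOT FOUND")
--             continue
--         first_letter = query[0].upper()
--         if first_letter in organized_dict and query in organized_dict[first_letter]:
--             results.append(f"{first_letter} {organized_dict[first_letter][query]}")
--         else:
--             results.append("NOT FOUND")
--     return results
-- ===== SOURCE B (Python) =====
-- # B: bucket words per first letter in one pass, then sort and rank each bucket;
-- # same results as the global-sort-then-group original (objective: alternative decomposition).
-- def build_and_search_dictionary(dictionary_words, search_queries):
--     buckets = {}
--     for word in dictionary_words.split(","):
--         buckets.setdefault(word[0].upper(), []).append(word)
--
--     organized = {}
--     for letter, bucket in buckets.items():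
--         ranks = {}
--         for i, w in enumerate(sorted(bucket), 1):
--             ranks[w] = i
--         organized[letter] = ranks
--
--     results = []
--     for query in search_queries:
--         if query == "":
--             results.append("NOT FOUND")
--             continue
--         letter = query[0].upper()
--         group = organized.get(letter)
--         if group is not None and query in group:
--             results.append(f"{letter} {group[query]}")
--         else:
--             results.append("NOT FOUND")
--     return results
-- ===== Notes on version B (the rewrite author's own statement) =====
-- stated objective: alternative
-- what changed: B partitions words into per-first-letter buckets in one pass, then sorts and enumerates each bucket to assign ranks, instead of A's global sort followed by a single grouping pass with running counters.
import Mathlib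
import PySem

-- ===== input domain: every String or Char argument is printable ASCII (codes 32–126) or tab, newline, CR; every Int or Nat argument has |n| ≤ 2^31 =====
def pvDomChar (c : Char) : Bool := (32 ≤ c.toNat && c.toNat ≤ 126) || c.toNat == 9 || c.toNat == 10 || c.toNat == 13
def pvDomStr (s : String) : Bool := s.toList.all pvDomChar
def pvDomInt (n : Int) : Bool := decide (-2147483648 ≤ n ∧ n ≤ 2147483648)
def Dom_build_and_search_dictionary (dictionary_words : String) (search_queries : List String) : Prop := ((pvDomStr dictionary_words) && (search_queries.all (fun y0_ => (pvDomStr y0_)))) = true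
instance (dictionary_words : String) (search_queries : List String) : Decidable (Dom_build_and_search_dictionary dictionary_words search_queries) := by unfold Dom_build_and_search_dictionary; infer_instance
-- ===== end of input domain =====

-- B groups the words into per-first-letter buckets in one pass and sorts/ranks each bucket,
-- instead of A's global sort followed by one grouping pass with running counters (objective: alternative).

-- shared helper: the expression word[0].upper() both Pythons contain
-- ("" is the branch Pre_ makes unreachable; Python raises IndexError there)
def pvFirst (w : String) : String :=
  match PySem.Str.pyGet? w 0 with
  | some c => String.ofList [PySem.Chars.upperChar c]
  | none => ""

-- ===== PORT A =====
-- A-side helper: one iteration of A's dictionary-building loop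
def stepA (st : PySem.Dict String (PySem.Dict String Int) × PySem.Dict String Int)
    (word : String) : PySem.Dict String (PySem.Dict String Int) × PySem.Dict String Int :=
  let fl := pvFirst word
  let od := if st.1.contains fl then st.1 else st.1.insert fl PySem.Dict.empty
  let wc := if st.1.contains fl then st.2 else st.2.insert fl 0
  let c := wc.getD fl 0 + 1
  (od.insert fl ((od.getD fl PySem.Dict.empty).insert word c), wc.insert fl c)

def build_and_search_dictionary (dictionary_words : String) (search_queries : List String) : List String :=
  let words := PySem.List.sorted ((PySem.Str.split? dictionary_words ",").getD []) (fun w => w) false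
  let od := (words.foldl stepA (PySem.Dict.empty, PySem.Dict.empty)).1
  search_queries.foldl (fun results query =>
    if query = "" then results ++ ["NOT FOUND"]
    else
      let fl := pvFirst query
      if od.contains fl && (od.getD fl PySem.Dict.empty).contains query then
        results ++ [fl ++ " " ++ PySem.Int.toStr ((od.getD fl PySem.Dict.empty).getD query 0)]
      else results ++ ["NOT FOUND"]) []

-- ===== PORT B =====
-- B-side helpers: the bucket-building step (setdefault+append), the rank dict of one
-- bucket (enumerate(sorted(bucket), 1)), and the organized-dict building step
def bstep (d : PySem.Dict String (List String)) (w : String) : PySem.Dict String (List String) :=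
  d.modify (pvFirst w) [] (· ++ [w])

def pvRanks (g : List String) : PySem.Dict String Int :=
  (PySem.List.enumerate (PySem.List.sorted g (fun w => w) false) 1).foldl
    (fun r iw => r.insert iw.2 iw.1) PySem.Dict.empty

def ostep (od : PySem.Dict String (PySem.Dict String Int)) (p : String × List String) :
    PySem.Dict String (PySem.Dict String Int) :=
  od.insert p.1 (pvRanks p.2)

def build_and_search_dictionary_alt (dictionary_words : String) (search_queries : List String) : List String :=
  let buckets := ((PySem.Str.split? dictionary_words ",").getD []).foldl bstep PySem.Dict.empty
  let organized := buckets.items.foldl ostep PySem.Dict.empty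
  search_queries.foldl (fun results query =>
    if query = "" then results ++ ["NOT FOUND"]
    else
      let fl := pvFirst query
      match organized.get? fl with
      | some group =>
        match group.get? query with
        | some i => results ++ [fl ++ " " ++ PySem.Int.toStr i]
        | none => results ++ ["NOT FOUND"]
      | none => results ++ ["NOT FOUND"]) []

-- ===== PRECONDITION & SPEC =====
-- Pre_ excludes exactly the inputs whose comma-split has an empty component (in
-- particular dictionary_words = ""), on which Python A raises IndexError at word[0].
def Pre_build_and_search_dictionary (dictionary_words : String) (search_queries : List String) : Prop :=
  ∀ w ∈ (PySem.Str.split? dictionary_words ",").getD [], w ≠ ""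
instance (dictionary_words : String) (search_queries : List String) : Decidable (Pre_build_and_search_dictionary dictionary_words search_queries) := by unfold Pre_build_and_search_dictionary; infer_instance
def pvWitness_build_and_search_dictionary : String × List String := ("b,a,Cat", ["a", "Cat", "z", ""])

def Spec_build_and_search_dictionary (dictionary_words : String) (search_queries : List String) (out : List String) : Prop := out = build_and_search_dictionary_alt dictionary_words search_queries
instance (dictionary_words : String) (search_queries : List String) (out : List String) : Decidable (Spec_build_and_search_dictionary dictionary_words search_queries out) := by unfold Spec_build_and_search_dictionary; infer_instance

-- ===== CLAIM (what is proved, stated in full; the proofs are below) =====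
def Claim_equal_build_and_search_dictionary : Prop := ∀ (dictionary_words : String) (search_queries : List String), Dom_build_and_search_dictionary dictionary_words search_queries → Pre_build_and_search_dictionary dictionary_words search_queries → Spec_build_and_search_dictionary dictionary_words search_queries (build_and_search_dictionary dictionary_words search_queries)

-- ===== LEMMAS AND PROOFS =====

-- the words of l whose uppercased first letter is L
def grp (L : String) (l : List String) : List String := l.filter (fun w => pvFirst w == L)

-- the rank dict A builds for one (already globally sorted) letter group
def rawRanks (g : List String) : PySem.Dict String Int :=
  (PySem.List.enumerate g 1).foldl (fun r iw => r.insert iw.2 iw.1) PySem.Dict.empty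

-- what A's outer dict associates to letter L after processing l
def lookA (l : List String) (L : String) : Option (PySem.Dict String Int) :=
  if grp L l = [] then none else some (rawRanks (grp L l))

lemma rawRanks_append (g : List String) (w : String) :
    rawRanks (g ++ [w]) = (rawRanks g).insert w ((g.length : Int) + 1) := by
  simp [rawRanks, PySem.List.enumerate_append, List.foldl_append, PySem.List.enumerate_cons,
    PySem.List.enumerate_nil, add_comm]

lemma grp_append_singleton (L : String) (p : List String) (w : String) :
    grp L (p ++ [w]) = grp L p ++ (if pvFirst w = L then [w] else []) := by
  simp [grp, List.filter_append, List.filter_cons]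

lemma get?_eq_find?_items {ν : Type} (d : PySem.Dict String ν) (L : String) :
    d.get? L = (d.items.find? (fun p => p.1 == L)).map Prod.snd := by
  rcases d with ⟨l⟩
  induction l with
  | nil => rfl
  | cons hd tl ih =>
    rw [PySem.Dict.get?_mk_cons]
    by_cases h : hd.1 == L
    · simp [List.find?, h]
    · simp only [List.find?]
      rw [if_neg (by simpa using h)]
      simpa [h] using ih

lemma bucket_getD (l : List String) :
    ∀ (d : PySem.Dict String (List String)) (L : String),
    (l.foldl bstep d).getD L [] = d.getD L [] ++ grp L l := by
  induction l with
  | nil => simp [grp]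
  | cons w tl ih =>
    intro d L
    rw [List.foldl_cons, ih]
    show (d.modify (pvFirst w) [] (· ++ [w])).getD L [] ++ grp L tl = _
    rw [PySem.Dict.getD_modify]
    by_cases h : L = pvFirst w
    · simp [grp, List.filter_cons, h]
    · simp [grp, List.filter_cons, if_neg h, Ne.symm h]

lemma bucket_contains (l : List String) :
    ∀ (d : PySem.Dict String (List String)) (L : String),
    (l.foldl bstep d).contains L = (d.contains L || !(grp L l).isEmpty) := by
  induction l with
  | nil => simp [grp]
  | cons w tl ih =>
    intro d L
    rw [List.foldl_cons, ih]
    show ((d.modify (pvFirst w) [] (· ++ [w])).contains L || _) = _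
    rw [PySem.Dict.contains_modify]
    by_cases h : L = pvFirst w
    · simp [grp, List.filter_cons, h]
    · have h1 : (L == pvFirst w) = false := by simp [h]
      have h2 : (pvFirst w == L) = false := by simp [Ne.symm h]
      simp [grp, List.filter_cons, h1, h2]

lemma bucket_get? (l : List String) (L : String) :
    (l.foldl bstep PySem.Dict.empty).get? L =
      if grp L l = [] then none else some (grp L l) := by
  have hc := bucket_contains l PySem.Dict.empty L
  have hg := bucket_getD l PySem.Dict.empty L
  by_cases h : grp L l = []
  · rw [if_pos h]
    rw [PySem.Dict.get?_eq_none_iff_contains, hc, h]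
    simp
  · rw [if_neg h]
    cases hv : (l.foldl bstep PySem.Dict.empty).get? L with
    | none =>
      rw [PySem.Dict.get?_eq_none_iff_contains, hc] at hv
      simp [List.isEmpty_iff, h] at hv
    | some v =>
      have := PySem.Dict.getD_of_get?_eq_some _ [] hv
      rw [this] at hg
      simp at hg
      rw [hg]

lemma org_get? (l : List (String × List String)) :
    ∀ (od : PySem.Dict String (PySem.Dict String Int)), (l.map Prod.fst).Nodup →
    ∀ L, (l.foldl ostep od).get? L =
      (match l.find? (fun p => p.1 == L) with
       | some p => some (pvRanks p.2)
       | none => od.get? L) := by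
  induction l with
  | nil => intro od _ L; simp
  | cons hd tl ih =>
    intro od hnd L
    rw [List.map_cons, List.nodup_cons] at hnd
    rw [List.foldl_cons, ih _ hnd.2]
    by_cases h : hd.1 = L
    · have hfindtl : tl.find? (fun p => p.1 == L) = none := by
        rw [List.find?_eq_none]
        intro x hx hpx
        exact hnd.1 (by rw [h, ← (by simpa using hpx : x.1 = L)]; exact List.mem_map_of_mem hx)
      rw [hfindtl]
      simp only [List.find?_cons, show (hd.1 == L) = true by simp [h]]
      show (od.insert hd.1 (pvRanks hd.2)).get? L = some (pvRanks hd.2)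
      rw [← h, PySem.Dict.get?_insert_self]
    · simp only [List.find?_cons, show (hd.1 == L) = false by simp [h]]
      cases htl : tl.find? (fun p => p.1 == L) with
      | some p => simp
      | none =>
        show (od.insert hd.1 (pvRanks hd.2)).get? L = od.get? L
        exact PySem.Dict.get?_insert_of_ne _ _ (Ne.symm h)

lemma sorted_filter_comm (xs : List String) (p : String → Bool) :
    PySem.List.sorted (xs.filter p) (fun w => w) false
      = (PySem.List.sorted xs (fun w => w) false).filter p := by
  apply PySem.List.eq_of_perm_of_pairwise_le_of_injective (fun w => w) (fun _ _ h => h)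
  · exact (PySem.List.sorted_perm _ _ _).trans ((PySem.List.sorted_perm xs _ _).filter p).symm
  · exact PySem.List.sorted_pairwise _ _
  · exact (PySem.List.sorted_pairwise xs _).filter p

lemma foldA_invariant (ws : List String) :
    ∀ (p : List String) (st : PySem.Dict String (PySem.Dict String Int) × PySem.Dict String Int),
    (∀ L, st.1.get? L = lookA p L) → (∀ L, st.2.getD L 0 = ((grp L p).length : Int)) →
    (∀ L, (ws.foldl stepA st).1.get? L = lookA (p ++ ws) L) := by
  induction ws with
  | nil => intro p st h1 _ L; simpa using h1 L
  | cons w tl ih =>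
    intro p st h1 h2 L
    rw [List.foldl_cons, show p ++ w :: tl = (p ++ [w]) ++ tl by simp]
    have hc : st.1.contains (pvFirst w) = (lookA p (pvFirst w)).isSome := by
      rw [PySem.Dict.contains_eq_isSome_get?, h1]
    have hgrS : grp (pvFirst w) (p ++ [w]) = grp (pvFirst w) p ++ [w] := by
      rw [grp_append_singleton]
      rw [show (if pvFirst w = pvFirst w then [w] else []) = [w] from if_pos rfl]
    have hgrN : ∀ K, K ≠ pvFirst w → grp K (p ++ [w]) = grp K p := by
      intro K hK
      rw [grp_append_singleton]
      rw [show (if pvFirst w = K then [w] else []) = [] from if_neg (fun hh => hK hh.symm)]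
      exact List.append_nil _
    by_cases hg : grp (pvFirst w) p = []
    · have hcf : st.1.contains (pvFirst w) = false := by rw [hc]; simp [lookA, hg]
      have hstep : stepA st w =
          (st.1.insert (pvFirst w) (PySem.Dict.empty.insert w 1), st.2.insert (pvFirst w) 1) := by
        simp [stepA, hcf, PySem.Dict.getD_insert_self, PySem.Dict.insert_insert_self]
      rw [hstep]
      apply ih
      · intro K
        by_cases hK : K = pvFirst w
        · subst hK
          rw [PySem.Dict.get?_insert_self, lookA, hgrS, hg, List.nil_append]
          rw [if_neg (show ([w] : List String) ≠ [] by simp)]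
          simp [rawRanks, PySem.List.enumerate_cons, PySem.List.enumerate_nil]
        · rw [PySem.Dict.get?_insert_of_ne _ _ hK, h1 K, lookA, lookA, hgrN K hK]
      · intro K
        by_cases hK : K = pvFirst w
        · subst hK
          rw [PySem.Dict.getD_insert_self, hgrS, hg, List.nil_append]
          simp
        · rw [PySem.Dict.getD_insert_of_ne _ _ _ hK, h2 K, hgrN K hK]
    · have hct : st.1.contains (pvFirst w) = true := by rw [hc]; simp [lookA, hg]
      have hG : st.1.get? (pvFirst w) = some (rawRanks (grp (pvFirst w) p)) := by
        rw [h1]; simp [lookA, hg]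
      have hgd : st.1.getD (pvFirst w) PySem.Dict.empty = rawRanks (grp (pvFirst w) p) :=
        PySem.Dict.getD_of_get?_eq_some _ _ hG
      have hstep : stepA st w =
          (st.1.insert (pvFirst w) (rawRanks (grp (pvFirst w) p ++ [w])),
           st.2.insert (pvFirst w) (((grp (pvFirst w) p).length : Int) + 1)) := by
        simp [stepA, hct, hgd, h2 (pvFirst w), rawRanks_append]
      rw [hstep]
      apply ih
      · intro K
        by_cases hK : K = pvFirst w
        · subst hK
          rw [PySem.Dict.get?_insert_self, lookA, hgrS]
          rw [if_neg (show grp (pvFirst w) p ++ [w] ≠ [] by simp)]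
        · rw [PySem.Dict.get?_insert_of_ne _ _ hK, h1 K, lookA, lookA, hgrN K hK]
      · intro K
        by_cases hK : K = pvFirst w
        · subst hK
          rw [PySem.Dict.getD_insert_self, hgrS]
          simp [List.length_append]
        · rw [PySem.Dict.getD_insert_of_ne _ _ _ hK, h2 K, hgrN K hK]

lemma key_lookup_eq (split : List String) (L : String) :
    ((PySem.List.sorted split (fun w => w) false).foldl stepA
        (PySem.Dict.empty, PySem.Dict.empty)).1.get? L
      = ((split.foldl bstep PySem.Dict.empty).items.foldl ostep PySem.Dict.empty).get? L := by
  rw [foldA_invariant _ [] (PySem.Dict.empty, PySem.Dict.empty)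
        (fun K => by simp [lookA, grp]) (fun K => by simp [grp]) L,
      List.nil_append]
  have hnodup : (((split.foldl bstep PySem.Dict.empty).items.map Prod.fst)).Nodup := by
    have h := PySem.Dict.nodup_keys_foldl_modify_key split pvFirst ([] : List String)
      (fun _ w => (· ++ [w])) PySem.Dict.empty (by simp)
    simpa [PySem.Dict.keys] using h
  rw [org_get? _ _ hnodup L]
  cases hfind : (split.foldl bstep PySem.Dict.empty).items.find? (fun p => p.1 == L) with
  | none =>
    have hb : (split.foldl bstep PySem.Dict.empty).get? L = none := by
      rw [get?_eq_find?_items, hfind]; rfl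
    rw [bucket_get?] at hb
    have hgs : grp L split = [] := by
      by_contra hne
      rw [if_neg hne] at hb
      cases hb
    have hws : grp L (PySem.List.sorted split (fun w => w) false) = [] := by
      show (PySem.List.sorted split (fun w => w) false).filter (fun w => pvFirst w == L) = []
      rw [← sorted_filter_comm, PySem.List.sorted_eq_nil_iff]
      exact hgs
    simp [lookA, hws]
  | some pr =>
    have hb : (split.foldl bstep PySem.Dict.empty).get? L = some pr.2 := by
      rw [get?_eq_find?_items, hfind]; rfl
    rw [bucket_get?] at hb
    have hne : grp L split ≠ [] := by
      intro hh; rw [if_pos hh] at hb; cases hb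
    rw [if_neg hne] at hb
    have hpr : pr.2 = grp L split := by
      injection hb with h; exact h.symm
    have hws : grp L (PySem.List.sorted split (fun w => w) false)
        = PySem.List.sorted (grp L split) (fun w => w) false := by
      show (PySem.List.sorted split (fun w => w) false).filter (fun w => pvFirst w == L) = _
      rw [show grp L split = List.filter (fun w => pvFirst w == L) split from rfl,
        sorted_filter_comm]
    have hwne : grp L (PySem.List.sorted split (fun w => w) false) ≠ [] := by
      rw [hws]
      intro hh
      exact hne ((PySem.List.sorted_eq_nil_iff _ _ _).mp hh)
    rw [lookA, if_neg hwne, hws]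
    show some (rawRanks (PySem.List.sorted (grp L split) (fun w => w) false))
      = some (pvRanks pr.2)
    rw [hpr]
    rfl

lemma query_fold_eq (od og : PySem.Dict String (PySem.Dict String Int))
    (h : ∀ L, od.get? L = og.get? L) (qs : List String) :
    ∀ (acc : List String),
    qs.foldl (fun results query =>
      if query = "" then results ++ ["NOT FOUND"]
      else
        let fl := pvFirst query
        if od.contains fl && (od.getD fl PySem.Dict.empty).contains query then
          results ++ [fl ++ " " ++ PySem.Int.toStr ((od.getD fl PySem.Dict.empty).getD query 0)]
        else results ++ ["NOT FOUND"]) acc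
    = qs.foldl (fun results query =>
      if query = "" then results ++ ["NOT FOUND"]
      else
        let fl := pvFirst query
        match og.get? fl with
        | some group =>
          match group.get? query with
          | some i => results ++ [fl ++ " " ++ PySem.Int.toStr i]
          | none => results ++ ["NOT FOUND"]
        | none => results ++ ["NOT FOUND"]) acc := by
  induction qs with
  | nil => intro acc; rfl
  | cons q tl ih =>
    intro acc
    rw [List.foldl_cons, List.foldl_cons]
    by_cases hq : q = ""
    · rw [if_pos hq, if_pos hq]; exact ih _
    · rw [if_neg hq, if_neg hq]
      show List.foldl _ _ tl = List.foldl _ _ tl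
      cases hog : og.get? (pvFirst q) with
      | none =>
        have hcf : od.contains (pvFirst q) = false := by
          rw [PySem.Dict.contains_eq_isSome_get?, h, hog]; rfl
        simp only [hcf, Bool.false_and, hog]
        rw [if_neg (show ¬(false = true) by simp)]
        exact ih _
      | some g =>
        have hood : od.get? (pvFirst q) = some g := by rw [h, hog]
        have hct : od.contains (pvFirst q) = true := by
          rw [PySem.Dict.contains_eq_isSome_get?, hood]; rfl
        have hgd : od.getD (pvFirst q) PySem.Dict.empty = g :=
          PySem.Dict.getD_of_get?_eq_some _ _ hood
        cases hq2 : g.get? q with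
        | none =>
          have hc2 : g.contains q = false := by
            rw [PySem.Dict.contains_eq_isSome_get?, hq2]; rfl
          simp only [hct, hgd, hc2, Bool.true_and, hog, hq2]
          rw [if_neg (show ¬(false = true) by simp)]
          exact ih _
        | some i =>
          have hc2 : g.contains q = true := by
            rw [PySem.Dict.contains_eq_isSome_get?, hq2]; rfl
          have hgd2 : g.getD q 0 = i := PySem.Dict.getD_of_get?_eq_some _ _ hq2
          simp only [hct, hgd, hc2, Bool.true_and, hog, hq2, hgd2]
          rw [if_pos trivial]
          exact ih _

-- ===== VERDICT (by name: the statement is the Claim_ definition above) =====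
theorem build_and_search_dictionary_spec : Claim_equal_build_and_search_dictionary := by
  intro dw sq _hdom _hpre
  unfold Spec_build_and_search_dictionary build_and_search_dictionary build_and_search_dictionary_alt
  exact query_fold_eq _ _ (key_lookup_eq ((PySem.Str.split? dw ",").getD [])) sq []
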